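-- pv_equiv track=rewrite | github.com/nestorNeo/WFNAPP | src/core/petrinet.py | group_concurrency
-- ===== SOURCE A (Python) =====
-- def group_concurrency(traces, concurrent_relations):
--     modified_traces = []
--     for trace in traces:
--         new_trace = []
--         skip_next = False
--         for i in range(len(trace)):
--             if skip_next:
--                 skip_next = False
--                 continue
--             if i < len(trace) - 1 and tuple(sorted([trace[i], trace[i+1]])) in concurrent_relations:
--                 new_trace.append(f"[{min(trace[i], trace[i+1])}||{max(trace[i], trace[i+1])}]")
--                 skip_next = True
--             else:
--                 new_trace.append(trace[i])
--         modified_traces.append(new_trace)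
--     return modified_traces
-- ===== SOURCE B (Python) =====
-- def group_concurrency(traces, concurrent_relations):
--     def first_pair(seq):
--         # index of the first adjacent pair of seq that is concurrent, else None
--         for k in range(len(seq) - 1):
--             if tuple(sorted((seq[k], seq[k + 1]))) in concurrent_relations:
--                 return k
--         return None
--
--     result = []
--     for trace in traces:
--         out = []
--         rest = list(trace)
--         j = first_pair(rest)
--         while j is not None:
--             a, b = rest[j], rest[j + 1]
--             out += rest[:j]                      # untouched slab before the merge event
--             out.append(f"[{min(a, b)}||{max(a, b)}]")
--             rest = rest[j + 2:]
--             j = first_pair(rest)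
--         out += rest
--         result.append(out)
--     return result
-- ===== Notes on version B (the rewrite author's own statement) =====
-- stated objective: alternative
-- what changed: Instead of A's per-position scan carrying a skip_next flag, B loops over merge events: it repeatedly searches the remaining suffix for the first concurrent adjacent pair, copies the whole untouched slab before it in one slice, emits the combined token and continues after the pair; unmerged elements are never examined one branch at a time in the outer loop.
import Mathlib
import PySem

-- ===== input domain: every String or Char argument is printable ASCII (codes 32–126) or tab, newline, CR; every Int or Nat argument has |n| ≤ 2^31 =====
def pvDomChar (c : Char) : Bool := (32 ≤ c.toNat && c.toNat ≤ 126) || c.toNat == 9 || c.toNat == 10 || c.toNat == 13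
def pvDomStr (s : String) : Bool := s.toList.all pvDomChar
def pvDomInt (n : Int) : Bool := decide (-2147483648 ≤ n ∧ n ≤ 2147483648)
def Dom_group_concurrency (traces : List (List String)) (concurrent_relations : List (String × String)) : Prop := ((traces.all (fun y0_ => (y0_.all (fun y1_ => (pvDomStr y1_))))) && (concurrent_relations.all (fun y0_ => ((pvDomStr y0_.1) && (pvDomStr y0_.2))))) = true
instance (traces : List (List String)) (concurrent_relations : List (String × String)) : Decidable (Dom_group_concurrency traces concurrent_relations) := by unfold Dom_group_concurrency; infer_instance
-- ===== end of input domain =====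

-- B loops over merge events: it finds the first concurrent adjacent pair in the remaining
-- suffix, copies the untouched slab before it wholesale, emits the token and continues after
-- the pair — instead of A's per-position scan with a skip_next flag (objective: alternative).

-- shared helpers: Python's tuple(sorted([a,b])), min(a,b), max(a,b) and the combined token
def pySortPair (a b : String) : String × String := if b < a then (b, a) else (a, b)
def pyMin (a b : String) : String := if b < a then b else a
def pyMax (a b : String) : String := if a < b then b else a
def pyToken (a b : String) : String := "[" ++ pyMin a b ++ "||" ++ pyMax a b ++ "]"

-- ===== PORT A =====
-- loop body of A's inner for-range loop (state: new_trace, skip_next)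
def stepA (rels : List (String × String)) (trace : List String)
    (st : List String × Bool) (i : Nat) : List String × Bool :=
  if st.2 then (st.1, false)
  else if i < trace.length - 1 ∧ pySortPair (trace.getD i "") (trace.getD (i+1) "") ∈ rels then
    (st.1 ++ [pyToken (trace.getD i "") (trace.getD (i+1) "")], true)
  else (st.1 ++ [trace.getD i ""], false)

def group_concurrency (traces : List (List String)) (concurrent_relations : List (String × String)) : List (List String) :=
  traces.map (fun trace =>
    ((List.range trace.length).foldl (stepA concurrent_relations trace) ([], false)).1)

-- ===== PORT B =====
-- B's first_pair helper: index of the first concurrent adjacent pair of the sequence, else none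
def findPair (rels : List (String × String)) : List String → Option Nat
  | x :: y :: rest => if pySortPair x y ∈ rels then some 0 else (findPair rels (y :: rest)).map (· + 1)
  | _ => none

theorem findPair_bound (rels : List (String × String)) :
    ∀ (l : List String) (j : Nat), findPair rels l = some j → j + 2 ≤ l.length
  | x :: y :: rest, j => by
    intro h
    simp only [findPair] at h
    split_ifs at h with hm
    · cases h; simp
    · rcases Option.map_eq_some_iff.mp h with ⟨k, hk, rfl⟩
      have := findPair_bound rels (y :: rest) k hk
      simp only [List.length_cons] at this ⊢
      omega
  | [], j => by intro h; simp [findPair] at h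
  | [_], j => by intro h; simp [findPair] at h

-- B's outer while loop over merge events: copy the slab before the first concurrent pair,
-- emit the token, continue after the pair
def mergeB (rels : List (String × String)) (trace : List String) : List String :=
  match h : findPair rels trace with
  | none => trace
  | some j =>
      trace.take j ++ [pyToken (trace.getD j "") (trace.getD (j+1) "")]
        ++ mergeB rels (trace.drop (j+2))
termination_by trace.length
decreasing_by
  have := findPair_bound rels trace j h
  simp only [List.length_drop]
  omega

def group_concurrency_alt (traces : List (List String)) (concurrent_relations : List (String × String)) : List (List String) :=
  traces.map (fun trace => mergeB concurrent_relations trace)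

-- ===== PRECONDITION & SPEC =====
def Spec_group_concurrency (traces : List (List String)) (concurrent_relations : List (String × String)) (out : List (List String)) : Prop := out = group_concurrency_alt traces concurrent_relations
instance (traces : List (List String)) (concurrent_relations : List (String × String)) (out : List (List String)) : Decidable (Spec_group_concurrency traces concurrent_relations out) := by unfold Spec_group_concurrency; infer_instance

-- ===== CLAIM (what is proved, stated in full; the proofs are below) =====
def Claim_equal_group_concurrency : Prop := ∀ (traces : List (List String)) (concurrent_relations : List (String × String)), Dom_group_concurrency traces concurrent_relations → Spec_group_concurrency traces concurrent_relations (group_concurrency traces concurrent_relations)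

-- ===== LEMMAS AND PROOFS =====

-- proof-level intermediate: the greedy result characterised by structural recursion
def mergeTrace (rels : List (String × String)) : List String → List String
  | [] => []
  | [x] => [x]
  | x :: y :: rest =>
    if pySortPair x y ∈ rels then pyToken x y :: mergeTrace rels rest
    else x :: mergeTrace rels (y :: rest)

theorem loop_eq (rels : List (String × String)) :
    ∀ n pre suf acc, suf.length = n →
      (List.range' pre.length n).foldl (stepA rels (pre ++ suf)) (acc, false)
        = (acc ++ mergeTrace rels suf, false) := by
  intro n
  induction n using Nat.strong_induction_on with
  | _ n ih =>
    intro pre suf acc hlen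
    match suf with
    | [] =>
      simp only [List.length_nil] at hlen
      subst hlen
      simp [mergeTrace]
    | [x] =>
      subst hlen
      simp only [List.length_cons, List.length_nil, List.range', List.foldl_cons, List.foldl_nil]
      simp [stepA, mergeTrace]
    | x :: y :: rest =>
      subst hlen
      by_cases hmem : pySortPair x y ∈ rels
      · have step1 : stepA rels (pre ++ x :: y :: rest) (acc, false) pre.length
            = (acc ++ [pyToken x y], true) := by
          simp [stepA, hmem]
        have step2 : stepA rels (pre ++ x :: y :: rest) (acc ++ [pyToken x y], true) (pre.length + 1)
            = (acc ++ [pyToken x y], false) := by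
          simp [stepA]
        have hrec := ih rest.length (by simp only [List.length_cons]; omega) (pre ++ [x, y]) rest (acc ++ [pyToken x y]) rfl
        simp only [List.length_cons, List.range', List.foldl_cons, step1, step2]
        have hpl : (pre ++ [x, y]).length = pre.length + 1 + 1 := by
          simp [List.length_append]
        have happ : pre ++ [x, y] ++ rest = pre ++ x :: y :: rest := by
          simp
        rw [hpl, happ] at hrec
        rw [hrec]
        simp [mergeTrace, hmem]
      · have step1 : stepA rels (pre ++ x :: y :: rest) (acc, false) pre.length
            = (acc ++ [x], false) := by
          simp [stepA, hmem]
        have hrec := ih (rest.length + 1) (by simp only [List.length_cons]; omega) (pre ++ [x]) (y :: rest) (acc ++ [x]) (by simp)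
        simp only [List.length_cons, List.range', List.foldl_cons, step1]
        simp only [List.range', List.foldl_cons] at hrec
        have hpl : (pre ++ [x]).length = pre.length + 1 := by simp
        have happ : pre ++ [x] ++ y :: rest = pre ++ x :: y :: rest := by simp
        rw [hpl, happ] at hrec
        rw [hrec]
        simp [mergeTrace, hmem]

theorem inner_eq (rels : List (String × String)) (trace : List String) :
    ((List.range trace.length).foldl (stepA rels trace) ([], false)).1 = mergeTrace rels trace := by
  have := loop_eq rels trace.length [] trace [] rfl
  simp only [List.nil_append, List.length_nil] at this
  rw [List.range_eq_range', this]

theorem mergeB_eq (rels : List (String × String)) (t : List String) :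
    mergeB rels t = match findPair rels t with
      | none => t
      | some j => t.take j ++ [pyToken (t.getD j "") (t.getD (j+1) "")] ++ mergeB rels (t.drop (j+2)) := by
  rw [mergeB]
  split <;> rename_i h <;> simp [h]

theorem mergeB_cons (rels : List (String × String)) (x y : String) (rest : List String)
    (hmem : pySortPair x y ∉ rels) :
    mergeB rels (x :: y :: rest) = x :: mergeB rels (y :: rest) := by
  rw [mergeB_eq rels (x :: y :: rest), mergeB_eq rels (y :: rest)]
  have hfp : findPair rels (x :: y :: rest) = (findPair rels (y :: rest)).map (· + 1) := by
    simp [findPair, hmem]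
  cases hin : findPair rels (y :: rest) with
  | none => simp [hfp, hin]
  | some j =>
    simp only [hfp, hin, Option.map_some]
    simp [List.getD, List.getElem?_cons]

theorem mergeTrace_eq_mergeB (rels : List (String × String)) :
    ∀ (t : List String), mergeTrace rels t = mergeB rels t := by
  intro t
  induction hn : t.length using Nat.strong_induction_on generalizing t with
  | _ n ih =>
    match t with
    | [] => rw [mergeB_eq]; rfl
    | [x] => rw [mergeB_eq]; rfl
    | x :: y :: rest =>
      by_cases hmem : pySortPair x y ∈ rels
      · rw [mergeB_eq]
        have hfp : findPair rels (x :: y :: rest) = some 0 := by simp [findPair, hmem]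
        simp only [hfp]
        have hrec := ih rest.length (by simp only [← hn, List.length_cons]; omega) rest rfl
        simp [mergeTrace, hmem, hrec, List.getD, pyToken]
      · have hrec := ih (y :: rest).length (by simp only [← hn, List.length_cons]; omega) (y :: rest) rfl
        rw [mergeB_cons rels x y rest hmem]
        simp [mergeTrace, hmem, hrec]

-- ===== VERDICT (by name: the statement is the Claim_ definition above) =====
theorem group_concurrency_spec : Claim_equal_group_concurrency := by
  intro traces rels _
  unfold Spec_group_concurrency group_concurrency group_concurrency_alt
  exact List.map_congr_left (fun trace _ => (inner_eq rels trace).trans (mergeTrace_eq_mergeB rels trace))
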